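-- pv_equiv track=rewrite | github.com/TINABJan254/Python-PTIT | CODE_PTIT/BienVaKieuDuLieuDonGian/PY01011_LietKeSoDep.py | check
-- ===== SOURCE A (Python) =====
-- def check(n):
--     rev = 0
--     cnt = 0
--     tmp = n
--     while n != 0:
--         r = n % 10
--         n //= 10
--         if r != 2 and r != 0 and r != 4 and r != 6 and r != 8: return False
--         cnt += 1
--         rev = rev * 10 + r
--     if cnt % 2 != 0 : return False
--     return ((cnt > 1) and (rev == tmp))
-- ===== SOURCE B (Python) =====
-- def check(n):
--     s = str(n)
--     return len(s) > 1 and len(s) % 2 == 0 and all(c in '02468' for c in s) and s == s[::-1]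
-- ===== Notes on version B (the rewrite author's own statement) =====
-- stated objective: idiomatic
-- what changed: Replaces A's arithmetic digit-reversal-and-count loop (mod and floor-division by ten) with a single conversion to the decimal string followed by length tests, an all-even-characters scan, and a slice palindrome test (s == s[::-1]).
import Mathlib
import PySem

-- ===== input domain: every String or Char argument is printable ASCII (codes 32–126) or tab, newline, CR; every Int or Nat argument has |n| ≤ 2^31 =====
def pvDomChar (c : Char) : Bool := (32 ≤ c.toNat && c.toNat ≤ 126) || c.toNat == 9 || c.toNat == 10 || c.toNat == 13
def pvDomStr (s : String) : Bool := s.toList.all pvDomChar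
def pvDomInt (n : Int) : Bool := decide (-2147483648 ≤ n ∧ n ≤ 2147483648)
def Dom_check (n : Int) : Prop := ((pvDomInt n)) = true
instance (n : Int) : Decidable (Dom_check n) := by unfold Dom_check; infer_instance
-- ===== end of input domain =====

-- B replaces A's arithmetic digit-reversal loop by one pass over the decimal string:
-- length tests, an all-even-characters scan, and a slice palindrome test (objective: idiomatic).

-- ===== PORT A =====
-- the while loop of A; `none` models A's early `return False` inside the loop

def checkLoop (rev cnt n : Int) : Option (Int × Int) :=
  if hn : n = 0 then some (rev, cnt)
  else if hr : PySem.Int.mod n 10 ≠ 2 ∧ PySem.Int.mod n 10 ≠ 0 ∧ PySem.Int.mod n 10 ≠ 4 ∧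
      PySem.Int.mod n 10 ≠ 6 ∧ PySem.Int.mod n 10 ≠ 8 then none
  else checkLoop (rev * 10 + PySem.Int.mod n 10) (cnt + 1) (PySem.Int.floordiv n 10)
termination_by n.natAbs
decreasing_by
  have h := PySem.Int.floordiv_mul_add_mod n 10
  have h1 := PySem.Int.mod_nonneg n (b := 10) (by omega)
  have h2 := PySem.Int.mod_lt n (b := 10) (by omega)
  simp only [not_and_or, not_not] at hr
  omega


def check (n : Int) : Bool :=
  match checkLoop 0 0 n with
  | none => false
  | some (rev, cnt) =>
      if PySem.Int.mod cnt 2 ≠ 0 then false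
      else decide (cnt > 1) && decide (rev = n)

-- ===== PORT B =====
-- Source B: s = str(n); return len(s) > 1 and len(s) % 2 == 0 and all(c in '02468' for c in s) and s == s[::-1]
-- worked on the character-list side: str(n).toList = PySem.Int.toChars n (PySem.Int.toList_toStr), s[::-1] = s.reverse
def check_alt (n : Int) : Bool :=
  let s := PySem.Int.toChars n
  decide (s.length > 1) && decide (s.length % 2 = 0)
    && s.all (fun c => ['0', '2', '4', '6', '8'].contains c)
    && decide (s = s.reverse)

-- ===== PRECONDITION & SPEC =====
def Spec_check (n : Int) (out : Bool) : Prop := out = check_alt n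
instance (n : Int) (out : Bool) : Decidable (Spec_check n out) := by unfold Spec_check; infer_instance

-- ===== CLAIM (what is proved, stated in full; the proofs are below) =====
def Claim_equal_check : Prop := ∀ (n : Int), Dom_check n → Spec_check n (check n)

-- ===== LEMMAS AND PROOFS =====

def revAcc : List Nat → Int → Int
  | [], a => a
  | d :: ds, a => revAcc ds (a * 10 + (d : Int))


theorem checkLoop_eq (rev cnt n : Int) :
    checkLoop rev cnt n =
      if n = 0 then some (rev, cnt)
      else if PySem.Int.mod n 10 ≠ 2 ∧ PySem.Int.mod n 10 ≠ 0 ∧ PySem.Int.mod n 10 ≠ 4 ∧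
               PySem.Int.mod n 10 ≠ 6 ∧ PySem.Int.mod n 10 ≠ 8 then none
      else checkLoop (rev * 10 + PySem.Int.mod n 10) (cnt + 1) (PySem.Int.floordiv n 10) := by
  rw [checkLoop]
  split_ifs <;> rfl

theorem checkLoop_neg : ∀ (k : Nat) (rev cnt n : Int), n.natAbs ≤ k → n < 0 →
    checkLoop rev cnt n = none := by
  intro k
  induction k with
  | zero => intro rev cnt n h1 h2; omega
  | succ k ih =>
    intro rev cnt n h1 h2
    have h := PySem.Int.floordiv_mul_add_mod n 10
    have hm1 := PySem.Int.mod_nonneg n (b := 10) (by omega)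
    have hm2 := PySem.Int.mod_lt n (b := 10) (by omega)
    rw [checkLoop_eq, if_neg (by omega)]
    split_ifs with hr
    · rfl
    · simp only [not_and_or, not_not] at hr
      exact ih _ _ _ (by omega) (by omega)

theorem checkLoop_nat (m : Nat) : ∀ rev cnt,
    checkLoop rev cnt (m : Int) =
      if (Nat.digits 10 m).all (fun d => d % 2 = 0)
      then some (revAcc (Nat.digits 10 m) rev, cnt + (Nat.digits 10 m).length)
      else none := by
  induction m using Nat.strong_induction_on with
  | _ m ih =>
    intro rev cnt
    rcases Nat.eq_zero_or_pos m with h0 | hpos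
    · subst h0; simp [checkLoop_eq, revAcc]
    · have hne : (m : Int) ≠ 0 := by omega
      have hmod : PySem.Int.mod (m : Int) 10 = ((m % 10 : Nat) : Int) := by
        exact_mod_cast PySem.Int.mod_natCast m 10
      have hdiv : PySem.Int.floordiv (m : Int) 10 = ((m / 10 : Nat) : Int) := by
        exact_mod_cast PySem.Int.floordiv_natCast m 10
      have hdig := Nat.digits_def' (b := 10) (by norm_num) hpos
      have hlt : m % 10 < 10 := Nat.mod_lt _ (by norm_num)
      rw [checkLoop_eq, if_neg hne]
      rw [hmod, hdiv]
      by_cases he : m % 10 % 2 = 0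
      · rw [if_neg (by omega), ih (m / 10) (Nat.div_lt_self hpos (by norm_num)), hdig]
        simp only [List.all_cons, he, decide_true, Bool.true_and, List.length_cons]
        split_ifs with h
        · show some (revAcc _ _, _) = some (revAcc (_ :: _) _, _)
          rw [revAcc]
          exact congrArg some (Prod.ext_iff.mpr ⟨rfl, by push_cast; ring⟩)
        · rfl
      · rw [if_pos (by omega), hdig, if_neg (by
          simp only [List.all_cons, Bool.and_eq_true, decide_eq_true_eq]
          intro hc
          exact he hc.1)]

theorem toDigitsCore_spec : ∀ (fuel m : Nat) (acc : List Char), 0 < m → m ≤ fuel →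
    Nat.toDigitsCore 10 fuel m acc = ((Nat.digits 10 m).map Nat.digitChar).reverse ++ acc := by
  intro fuel
  induction fuel with
  | zero => intro m acc h1 h2; omega
  | succ fuel ih =>
    intro m acc h1 h2
    rw [Nat.toDigitsCore]
    have hdig := Nat.digits_def' (b := 10) (by norm_num) h1
    by_cases hz : m / 10 = 0
    · simp only [hz, if_pos]
      rw [hdig, hz]
      simp
    · have hltm : m / 10 < m := Nat.div_lt_self h1 (by norm_num)
      rw [if_neg hz, ih (m / 10) _ (Nat.pos_of_ne_zero hz) (by omega), hdig]
      simp

theorem toChars_pos (n : Int) (h : 0 < n) :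
    PySem.Int.toChars n = ((Nat.digits 10 n.toNat).map Nat.digitChar).reverse := by
  rw [PySem.Int.toChars, if_neg (by omega), Nat.toDigits]
  rw [toDigitsCore_spec _ _ _ (by omega) (by omega)]
  simp

theorem digitChar_even (d : Nat) (h : d < 10) :
    (['0','2','4','6','8'].contains (Nat.digitChar d)) = decide (d % 2 = 0) := by
  interval_cases d <;> decide

theorem digitChar_inj (d e : Nat) (hd : d < 10) (he : e < 10) :
    Nat.digitChar d = Nat.digitChar e → d = e := by
  interval_cases d <;> interval_cases e <;> decide

theorem map_digitChar_inj : ∀ (ds es : List Nat), (∀ d ∈ ds, d < 10) → (∀ e ∈ es, e < 10) →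
    ds.map Nat.digitChar = es.map Nat.digitChar → ds = es := by
  intro ds
  induction ds with
  | nil => intro es _ _ h; cases es <;> simp_all
  | cons d ds ih =>
    intro es hd he h
    cases es with
    | nil => simp_all
    | cons e es =>
      simp only [List.map_cons, List.cons.injEq] at h
      have h1 := digitChar_inj d e (hd d (by simp)) (he e (by simp)) h.1
      have h2 := ih es (fun x hx => hd x (by simp [hx])) (fun x hx => he x (by simp [hx])) h.2
      simp [h1, h2]

theorem revAcc_eq : ∀ (ds : List Nat) (a : Int),
    revAcc ds a = ((Nat.ofDigits 10 ds.reverse : Nat) : Int) + a * 10 ^ ds.length := by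
  intro ds
  induction ds with
  | nil => intro a; simp [revAcc, Nat.ofDigits_nil]
  | cons d ds ih =>
    intro a
    have hN : (Nat.ofDigits 10 ((d :: ds).reverse) : Nat)
        = Nat.ofDigits 10 ds.reverse + 10 ^ ds.length * d := by
      rw [List.reverse_cons, Nat.ofDigits_append, Nat.ofDigits_singleton, List.length_reverse]
    rw [revAcc, ih, hN]
    push_cast [List.length_cons]
    ring

theorem ofDigits_inj : ∀ (ds es : List Nat), ds.length = es.length →
    (∀ d ∈ ds, d < 10) → (∀ e ∈ es, e < 10) →
    Nat.ofDigits 10 ds = Nat.ofDigits 10 es → ds = es := by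
  intro ds
  induction ds with
  | nil => intro es hl _ _ _; cases es <;> simp_all
  | cons d ds ih =>
    intro es hl hd he hv
    cases es with
    | nil => simp_all
    | cons e es =>
      rw [Nat.ofDigits_cons, Nat.ofDigits_cons] at hv
      have hd0 : d < 10 := hd d (by simp)
      have he0 : e < 10 := he e (by simp)
      have hde : d = e ∧ Nat.ofDigits 10 ds = Nat.ofDigits 10 es := by omega
      have := ih es (by simpa using hl) (fun x hx => hd x (by simp [hx]))
        (fun x hx => he x (by simp [hx])) hde.2
      simp [hde.1, this]

theorem all_digitChar : ∀ (ds : List Nat), (∀ d ∈ ds, d < 10) →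
    (ds.map Nat.digitChar).all (fun c => (['0','2','4','6','8'].contains c))
      = ds.all (fun d => d % 2 = 0) := by
  intro ds
  induction ds with
  | nil => intro _; rfl
  | cons d ds ih =>
    intro h
    simp only [List.map_cons, List.all_cons]
    rw [digitChar_even d (h d (by simp)), ih (fun x hx => h x (by simp [hx]))]


theorem check_eq_alt (n : Int) : check n = check_alt n := by
  rcases lt_trichotomy n 0 with hneg | hzero | hpos
  · rw [check, checkLoop_neg n.natAbs 0 0 n (le_refl _) hneg]
    rw [check_alt, PySem.Int.toChars, if_pos hneg]
    simp
  · subst hzero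
    have h0 : checkLoop 0 0 0 = some (0, 0) := by rw [checkLoop_eq]; simp
    rw [check, h0]
    norm_num [PySem.Int.mod]
    decide
  · set m := n.toNat with hmdef
    have hm : (m : Int) = n := by omega
    have hmpos : 0 < m := by omega
    set ds := Nat.digits 10 m with hdsdef
    have hlt10 : ∀ d ∈ ds, d < 10 := fun d hd => Nat.digits_lt_base (by norm_num) hd
    have hA : checkLoop 0 0 n =
        if ds.all (fun d => d % 2 = 0)
        then some (revAcc ds 0, 0 + (ds.length : Int))
        else none := by rw [← hm, checkLoop_nat]
    have hchars : PySem.Int.toChars n = (ds.map Nat.digitChar).reverse := toChars_pos n hpos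
    have hlen : (PySem.Int.toChars n).length = ds.length := by
      rw [hchars]; simp
    have hrev : (revAcc ds 0 = n) ↔ ds.reverse = ds := by
      rw [revAcc_eq]
      simp only [zero_mul, add_zero]
      have hm' : (Nat.ofDigits 10 ds : Nat) = m := by rw [hdsdef]; exact Nat.ofDigits_digits 10 m
      constructor
      · intro h
        have hvalN : (Nat.ofDigits 10 ds.reverse : Nat) = m := by omega
        exact ofDigits_inj ds.reverse ds (by simp) (fun d hd => hlt10 d (by simpa using hd))
          hlt10 (by rw [hvalN, hm'])
      · intro h
        rw [h, hm']
        exact hm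
    have hs : (PySem.Int.toChars n = (PySem.Int.toChars n).reverse) ↔ ds.reverse = ds := by
      rw [hchars, List.reverse_reverse]
      constructor
      · intro h
        apply map_digitChar_inj ds.reverse ds (fun d hd => hlt10 d (by simpa using hd)) hlt10
        rw [List.map_reverse]
        exact h
      · intro h
        conv_lhs => rw [← List.map_reverse, h]
    have hac : (PySem.Int.toChars n).all (fun c => (['0','2','4','6','8'].contains c))
        = ds.all (fun d => d % 2 = 0) := by
      rw [hchars, List.all_reverse, all_digitChar ds hlt10]
    rw [check, hA, check_alt]
    by_cases hall : ds.all (fun d => d % 2 = 0) = true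
    · rw [if_pos hall]
      have hmod2 : PySem.Int.mod (0 + (ds.length : Int)) 2 = ((ds.length % 2 : Nat) : Int) := by
        rw [zero_add]; exact_mod_cast PySem.Int.mod_natCast ds.length 2
      have hd1 : decide ((0 : Int) + (ds.length : Int) > 1) = decide (1 < ds.length) :=
        decide_eq_decide.mpr (by omega)
      have hd2 : decide (revAcc ds 0 = n) = decide (ds.reverse = ds) := decide_eq_decide.mpr hrev
      have hd3 : decide (PySem.Int.toChars n = (PySem.Int.toChars n).reverse)
          = decide (ds.reverse = ds) := decide_eq_decide.mpr hs
      simp only [hmod2, hd1, hd2, hac, hall, hlen, hd3]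
      by_cases h2 : ds.length % 2 = 0
      · rw [if_neg (by omega)]
        simp [h2]
      · rw [if_pos (by omega)]
        simp [h2]
    · rw [if_neg hall]
      rw [hac]
      have hf : ds.all (fun d => d % 2 = 0) = false := by simpa using hall
      simp [hf]

-- ===== VERDICT (by name: the statement is the Claim_ definition above) =====
theorem check_spec : Claim_equal_check := by
  intro n _
  unfold Spec_check
  exact check_eq_alt n
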